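-- pv_equiv track=rewrite | github.com/cjl0701/CodingTest | 소마/2-2.py | f
-- ===== SOURCE A (Python) =====
-- def f(idx, n, a, d):
--     if idx < 0 or idx >= n:  # 실패
--         return 0
--
--     if d[idx] == -2:  # 밟은 곳 또 밟음 -> 무한 회로
--         cnt = 1
--         start = idx
--         while True:  # 다시 돌아올 때까지 count
--             next = idx + a[idx]  # 이동
--             if next == start:  # 다시 돌아옴
--                 break
--             cnt += 1
--             idx = next
--         return cnt  # 이전에 호출했던 d[idx]에서 cnt 기록 됨
--
--     if d[idx] == -1:  # 첫 방문
--         d[idx] = -2  # 밟음 표시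
--         d[idx] = f(idx + a[idx], n, a, d)
--     return d[idx]
-- ===== SOURCE B (Python) =====
-- def f(idx, n, a, d):
--     # Iterative chain walk instead of recursion; return-value equivalence (both also
--     # overwrite d on the visited chain with the final value, like A does).
--     chain = []
--     cur = idx
--     while True:
--         if cur < 0 or cur >= n:
--             val = 0
--             break
--         if cur in chain:  # closed a cycle: its length is the answer
--             val = len(chain) - chain.index(cur)
--             break
--         if d[cur] != -1:  # already resolved
--             val = d[cur]
--             break
--         chain.append(cur)
--         cur = cur + a[cur]
--     for i in chain:
--         d[i] = val
--     return val
-- ===== Notes on version B (the rewrite author's own statement) =====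
-- stated objective: alternative
-- what changed: Replaces A's recursion-with-memo-marking (mark -2, recurse, unwind writing d[idx]) by a single iterative walk that records the visited chain in a list, classifies the stopping node (out-of-bounds -> 0, revisited chain node -> cycle length from its recorded position, resolved node -> its value) and then writes the value back to the whole chain, so both the recursion and the separate cycle-counting while-loop disappear.
-- outside the precondition, e.g. on f(1, 2, [0, 0], [3, -2]): A returns 1, B returns -2; on f(0, 2, [1, 0], [-2, -1]): A does not finish within the time limit, B returns -2
import Mathlib
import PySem

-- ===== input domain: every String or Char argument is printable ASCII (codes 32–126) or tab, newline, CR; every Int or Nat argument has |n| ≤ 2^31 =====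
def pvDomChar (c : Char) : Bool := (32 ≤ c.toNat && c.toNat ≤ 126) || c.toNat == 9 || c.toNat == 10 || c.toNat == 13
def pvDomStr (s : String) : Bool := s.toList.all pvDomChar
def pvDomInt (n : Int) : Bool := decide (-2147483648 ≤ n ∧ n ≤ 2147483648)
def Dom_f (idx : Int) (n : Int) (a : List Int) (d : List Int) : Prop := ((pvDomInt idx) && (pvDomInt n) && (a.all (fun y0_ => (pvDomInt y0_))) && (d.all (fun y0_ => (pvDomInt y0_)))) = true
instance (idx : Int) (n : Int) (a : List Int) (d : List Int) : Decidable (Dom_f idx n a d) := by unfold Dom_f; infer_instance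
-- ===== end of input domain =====

-- B replaces A's recursion-with-marking by one iterative chain walk; A mutates d in place and so
-- does B (same final d on Pre_), but the equivalence proved here is about the RETURN value only.

-- ===== PORT A =====
-- d[i] / a[i] read with 0 ≤ i < length on every access Pre_f admits (Python raises outside; those
-- inputs are excluded by Pre_f), so an in-range read is exact here.
def pvGet (xs : List Int) (i : Int) : Int := xs.getD i.toNat 0

-- the inner `while True` cycle-counting loop of A; fuel only makes the loop total (Pre_f inputs
-- reach the break strictly before the fuel runs out)
def fCyc : Nat → Int → Int → List Int → Int → Int
  | 0, _, _, _, cnt => cnt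
  | fuel + 1, start, idx, a, cnt =>
    let next := idx + pvGet a idx
    if next = start then cnt else fCyc fuel start next a (cnt + 1)

-- A's recursion, state (value, mutated d); fuel d.length+1 bounds the recursion depth (each call
-- turns one -1 entry of d into -2), it is never exhausted on Pre_f inputs
def fA : Nat → Int → Int → List Int → List Int → Int × List Int
  | 0, _, _, _, d => (0, d)
  | fuel + 1, idx, n, a, d =>
    if idx < 0 ∨ n ≤ idx then (0, d)
    else if pvGet d idx = -2 then (fCyc (d.length + 1) idx idx a 1, d)
    else if pvGet d idx = -1 then
      let r := fA fuel (idx + pvGet a idx) n a (d.set idx.toNat (-2))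
      let d2 := r.2.set idx.toNat r.1
      (pvGet d2 idx, d2)
    else (pvGet d idx, d)

def f (idx : Int) (n : Int) (a : List Int) (d : List Int) : Int :=
  (fA (d.length + 1) idx n a d).1

-- ===== PORT B =====
-- Source B's `while True` walk carrying the visited chain; same fuel bound (the chain gains one fresh
-- node per iteration), never exhausted on Pre_f inputs
def fWalk : Nat → Int → Int → List Int → List Int → List Int → Int
  | 0, _, _, _, _, _ => 0
  | fuel + 1, cur, n, a, d, chain =>
    if cur < 0 ∨ n ≤ cur then 0
    else if chain.contains cur then (chain.length : Int) - (chain.idxOf cur : Int)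
    else if pvGet d cur ≠ -1 then pvGet d cur
    else fWalk fuel (cur + pvGet a cur) n a d (chain ++ [cur])

def f_alt (idx : Int) (n : Int) (a : List Int) (d : List Int) : Int :=
  fWalk (d.length + 1) idx n a d []

-- ===== PRECONDITION & SPEC =====
-- Pre_f excludes only the inputs with 0 ≤ idx < n on which A can raise an IndexError (a or d
-- shorter than n, so the walk can step outside the lists) or on which a -2 already present in d
-- makes A run its cycle walk on an uncontrolled configuration (it diverges, raises, or returns an
-- accidental count that depends on A's marking protocol rather than on the data).
def Pre_f (idx : Int) (n : Int) (a : List Int) (d : List Int) : Prop :=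
  idx < 0 ∨ n ≤ idx ∨ (n ≤ (a.length : Int) ∧ n ≤ (d.length : Int) ∧ (-2 : Int) ∉ d)
instance (idx : Int) (n : Int) (a : List Int) (d : List Int) : Decidable (Pre_f idx n a d) := by
  unfold Pre_f; infer_instance

def pvWitness_f : Int × Int × List Int × List Int := (0, 3, [1, 1, -2], [-1, -1, -1])

def Spec_f (idx : Int) (n : Int) (a : List Int) (d : List Int) (out : Int) : Prop := out = f_alt idx n a d
instance (idx : Int) (n : Int) (a : List Int) (d : List Int) (out : Int) : Decidable (Spec_f idx n a d out) := by unfold Spec_f; infer_instance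

-- ===== CLAIM (what is proved, stated in full; the proofs are below) =====
def Claim_equal_f : Prop := ∀ (idx : Int) (n : Int) (a : List Int) (d : List Int), Dom_f idx n a d → Pre_f idx n a d → Spec_f idx n a d (f idx n a d)

-- ===== LEMMAS AND PROOFS =====

-- d with every chain node marked -2 (A's footprint after descending along chain)
def pvMark (d : List Int) (chain : List Int) : List Int :=
  chain.foldl (fun dd c => dd.set c.toNat (-2)) d

-- chain is a step-path of a, ending one step before cur
def pvFollows (a : List Int) : List Int → Int → Prop
  | [], _ => True
  | x :: t, cur => x + pvGet a x = t.headD cur ∧ pvFollows a t cur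

lemma pvMark_length (chain : List Int) : ∀ d : List Int, (pvMark d chain).length = d.length := by
  induction chain with
  | nil => intro d; rfl
  | cons x t ih => intro d; simp [pvMark] at ih ⊢; rw [ih]; simp

lemma pvMark_append (d : List Int) (chain : List Int) (c : Int) :
    pvMark d (chain ++ [c]) = (pvMark d chain).set c.toNat (-2) := by
  simp [pvMark, List.foldl_append]

lemma pvGet_set_self (d : List Int) (i : Int) (v : Int) (h : i.toNat < d.length) :
    pvGet (d.set i.toNat v) i = v := by
  simp [pvGet, List.getD_eq_getElem?_getD, List.getElem?_set_self h]

lemma pvGet_set_ne (d : List Int) (i j v : Int) (h0 : 0 ≤ i) (h0' : 0 ≤ j) (hne : i ≠ j) :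
    pvGet (d.set i.toNat v) j = pvGet d j := by
  have : i.toNat ≠ j.toNat := by omega
  simp [pvGet, List.getD_eq_getElem?_getD, List.getElem?_set_ne this]

lemma pvGet_mark_not_mem (chain : List Int) (c : Int) (h0 : 0 ≤ c) :
    ∀ d : List Int, c ∉ chain → (∀ x ∈ chain, 0 ≤ x) →
    pvGet (pvMark d chain) c = pvGet d c := by
  induction chain with
  | nil => intro d _ _; rfl
  | cons x t ih =>
    intro d hc hall
    have hx : x ≠ c := fun h => hc (h ▸ List.mem_cons_self)
    have : pvMark d (x :: t) = pvMark (d.set x.toNat (-2)) t := rfl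
    rw [this, ih _ (fun h => hc (List.mem_cons_of_mem _ h)) (fun y hy => hall y (List.mem_cons_of_mem _ hy))]
    exact pvGet_set_ne d x c (-2) (hall x List.mem_cons_self) h0 hx

lemma pvGet_mark_mem (chain : List Int) (c : Int) :
    ∀ d : List Int, c ∈ chain → (∀ x ∈ chain, 0 ≤ x ∧ x.toNat < d.length) →
    pvGet (pvMark d chain) c = -2 := by
  induction chain with
  | nil => intro d hc _; cases hc
  | cons x t ih =>
    intro d hc hall
    have hrec : pvMark d (x :: t) = pvMark (d.set x.toNat (-2)) t := rfl
    by_cases hct : c ∈ t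
    · rw [hrec]
      exact ih _ hct (fun y hy => by
        have := hall y (List.mem_cons_of_mem _ hy); simpa [List.length_set] using this)
    · have hcx : c = x := (List.mem_cons.mp hc).resolve_right hct
      subst hcx
      rw [hrec, pvGet_mark_not_mem t c (hall c List.mem_cons_self).1 _ hct
        (fun y hy => (hall y (List.mem_cons_of_mem _ hy)).1)]
      exact pvGet_set_self d c (-2) (hall c List.mem_cons_self).2

lemma chain_len_le (chain : List Int) (n : Int) (L : Nat) (hnd : n ≤ (L : Int))
    (hnodup : chain.Nodup) (hrange : ∀ c ∈ chain, 0 ≤ c ∧ c < n) : chain.length ≤ L := by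
  have hmapnd : (chain.map Int.toNat).Nodup := by
    refine hnodup.map_on ?_
    intro x hx y hy h
    have hx' := (hrange x hx).1; have hy' := (hrange y hy).1
    omega
  have hsub : (chain.map Int.toNat).toFinset ⊆ Finset.range n.toNat := by
    intro m hm
    simp only [List.mem_toFinset, List.mem_map] at hm
    rcases hm with ⟨x, hx, rfl⟩
    have := hrange x hx
    simp only [Finset.mem_range]; omega
  calc chain.length = (chain.map Int.toNat).length := by simp
    _ = (chain.map Int.toNat).toFinset.card := (List.toFinset_card_of_nodup hmapnd).symm
    _ ≤ (Finset.range n.toNat).card := Finset.card_le_card hsub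
    _ = n.toNat := Finset.card_range _
    _ ≤ L := by omega

lemma pvFollows_tail (a : List Int) (chain : List Int) (cur : Int)
    (h : pvFollows a chain cur) : pvFollows a chain.tail cur := by
  cases chain with
  | nil => trivial
  | cons x t => exact h.2

lemma pvFollows_drop (a : List Int) (chain : List Int) (cur : Int) (p : Nat)
    (h : pvFollows a chain cur) : pvFollows a (chain.drop p) cur := by
  induction p with
  | zero => simpa using h
  | succ p ih => rw [← List.tail_drop]; exact pvFollows_tail _ _ _ ih

lemma pvFollows_append (a : List Int) (chain : List Int) (cur : Int)
    (h : pvFollows a chain cur) :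
    pvFollows a (chain ++ [cur]) (cur + pvGet a cur) := by
  induction chain with
  | nil => exact ⟨rfl, trivial⟩
  | cons x t ih =>
    refine ⟨?_, ih h.2⟩
    have := h.1
    cases t with
    | nil => simpa using this
    | cons y s => simpa using this

lemma fCyc_spec (a : List Int) (start : Int) :
    ∀ (rest : List Int) (s0 cnt : Int) (fuel : Nat),
    pvFollows a (s0 :: rest) start → start ∉ rest → rest.length < fuel →
    fCyc fuel start s0 a cnt = cnt + rest.length := by
  intro rest
  induction rest with
  | nil =>
    intro s0 cnt fuel h _ hf
    obtain ⟨fuel, rfl⟩ : ∃ m, fuel = m + 1 := ⟨fuel - 1, by omega⟩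
    have hstep : s0 + pvGet a s0 = start := by simpa using h.1
    simp [fCyc, hstep]
  | cons y t ih =>
    intro s0 cnt fuel h hs hf
    obtain ⟨fuel, rfl⟩ : ∃ m, fuel = m + 1 := ⟨fuel - 1, by omega⟩
    have hstep : s0 + pvGet a s0 = y := by simpa using h.1
    have hy : y ≠ start := fun hh => hs (hh ▸ List.mem_cons_self)
    have hne : fCyc (fuel + 1) start s0 a cnt = fCyc fuel start y a (cnt + 1) := by
      simp [fCyc, hstep, hy]
    rw [hne, ih y (cnt + 1) fuel h.2 (fun hh => hs (List.mem_cons_of_mem _ hh)) (by simpa using hf)]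
    simp only [List.length_cons]
    push_cast
    ring

lemma fA_len : ∀ (fuel : Nat) (idx n : Int) (a d : List Int),
    ((fA fuel idx n a d).2).length = d.length := by
  intro fuel
  induction fuel with
  | zero => intro idx n a d; rfl
  | succ fuel ih =>
    intro idx n a d
    simp only [fA]
    split_ifs with h1 h2 h3
    · rfl
    · rfl
    · simp [List.length_set, ih]
    · rfl

lemma pvMain (n : Int) (a d : List Int) (hnd : n ≤ (d.length : Int))
    (hno2 : (-2 : Int) ∉ d) :
    ∀ (fuel : Nat) (chain : List Int) (cur : Int),
    chain.Nodup →
    (∀ c ∈ chain, 0 ≤ c ∧ c < n ∧ pvGet d c = -1) →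
    pvFollows a chain cur →
    d.length + 1 ≤ fuel + chain.length →
    (fA fuel cur n a (pvMark d chain)).1 = fWalk fuel cur n a d chain := by
  intro fuel
  induction fuel with
  | zero =>
    intro chain cur hnodup hchain _ hfuel
    have := chain_len_le chain n d.length hnd hnodup (fun c hc => ⟨(hchain c hc).1, (hchain c hc).2.1⟩)
    omega
  | succ fuel ih =>
    intro chain cur hnodup hchain hfollows hfuel
    by_cases hg : cur < 0 ∨ n ≤ cur
    · simp [fA, fWalk, hg]
    · have h0 : 0 ≤ cur := by omega
      have hcn : cur < n := by omega
      have hcd : cur.toNat < d.length := by omega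
      have hranges : ∀ x ∈ chain, 0 ≤ x ∧ x.toNat < d.length := fun x hx => by
        obtain ⟨h1, h2, -⟩ := hchain x hx
        exact ⟨h1, by omega⟩
      by_cases hm : cur ∈ chain
      · -- cycle: A runs fCyc, B reads the chain position
        have hmark : pvGet (pvMark d chain) cur = -2 := pvGet_mark_mem chain cur d hm hranges
        have hcontains : chain.contains cur = true := by
          simpa [List.contains_iff_mem] using hm
        have hA : (fA (fuel + 1) cur n a (pvMark d chain)).1 =
            fCyc ((pvMark d chain).length + 1) cur cur a 1 := by
          simp only [fA]
          rw [if_neg hg, if_pos hmark]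
        have hB : fWalk (fuel + 1) cur n a d chain =
            (chain.length : Int) - (chain.idxOf cur : Int) := by
          simp only [fWalk]
          rw [if_neg hg, if_pos hcontains]
        rw [hA, hB, pvMark_length]
        set p := chain.idxOf cur with hp
        have hplt : p < chain.length := List.idxOf_lt_length_of_mem hm
        have hdrop : chain.drop p = cur :: chain.drop (p + 1) := by
          rw [List.drop_eq_getElem_cons hplt, List.getElem_idxOf]
        have hfol : pvFollows a (cur :: chain.drop (p + 1)) cur := by
          rw [← hdrop]; exact pvFollows_drop a chain cur p hfollows
        have hnds : (cur :: chain.drop (p + 1)).Nodup := by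
          rw [← hdrop]; exact hnodup.sublist (List.drop_sublist _ _)
        have hnin : cur ∉ chain.drop (p + 1) := (List.nodup_cons.mp hnds).1
        have hlen : chain.length ≤ d.length :=
          chain_len_le chain n d.length hnd hnodup (fun c hc => ⟨(hchain c hc).1, (hchain c hc).2.1⟩)
        have hdl : (chain.drop (p + 1)).length < d.length + 1 := by
          simp only [List.length_drop]; omega
        rw [fCyc_spec a cur (chain.drop (p + 1)) cur 1 (d.length + 1) hfol hnin hdl]
        have : (chain.drop (p + 1)).length = chain.length - (p + 1) := List.length_drop
        push_cast [this]
        omega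
      · -- fresh or resolved node
        have hmark : pvGet (pvMark d chain) cur = pvGet d cur :=
          pvGet_mark_not_mem chain cur h0 d hm (fun x hx => (hchain x hx).1)
        have hcontains : chain.contains cur = false := by
          simpa [List.contains_iff_mem] using hm
        have hne2 : pvGet d cur ≠ -2 := by
          intro hh
          apply hno2
          have : d[cur.toNat] = -2 := by
            have := hh
            simpa [pvGet, List.getD_eq_getElem?_getD, List.getElem?_eq_getElem hcd] using this
          exact this ▸ List.getElem_mem hcd
        by_cases hv : pvGet d cur = -1
        · -- both recurse
          have hstepA : (fA (fuel + 1) cur n a (pvMark d chain)).1 =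
              (fA fuel (cur + pvGet a cur) n a ((pvMark d chain).set cur.toNat (-2))).1 := by
            have hlen2 : cur.toNat <
                ((fA fuel (cur + pvGet a cur) n a ((pvMark d chain).set cur.toNat (-2))).2).length := by
              rw [fA_len]; simp [List.length_set, pvMark_length]; omega
            simp only [fA, hmark, hv]
            rw [if_neg hg, if_neg (by decide)]
            exact pvGet_set_self _ _ _ hlen2
          have hstepB : fWalk (fuel + 1) cur n a d chain =
              fWalk fuel (cur + pvGet a cur) n a d (chain ++ [cur]) := by
            simp [fWalk, hg, hv, hm]
          rw [hstepA, hstepB, ← pvMark_append]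
          refine ih (chain ++ [cur]) (cur + pvGet a cur) ?_ ?_ ?_ ?_
          · simp [List.nodup_append, hnodup]
            exact fun x hx h => hm (h ▸ hx)
          · intro c hc
            rcases List.mem_append.mp hc with h | h
            · exact hchain c h
            · simp at h; subst h; exact ⟨h0, hcn, hv⟩
          · exact pvFollows_append a chain cur hfollows
          · simp; omega
        · -- resolved: both return d[cur]
          have hA : (fA (fuel + 1) cur n a (pvMark d chain)).1 = pvGet (pvMark d chain) cur := by
            simp only [fA]
            rw [if_neg (by omega), if_neg (by simp [hmark, hne2]), if_neg (by simp [hmark, hv])]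
          have hB : fWalk (fuel + 1) cur n a d chain = pvGet d cur := by
            simp [fWalk, hg, hv, hm]
          rw [hA, hB, hmark]

-- ===== VERDICT (by name: the statement is the Claim_ definition above) =====
theorem f_spec : Claim_equal_f := by
  intro idx n a d _ hpre
  unfold Spec_f f f_alt
  by_cases hg : idx < 0 ∨ n ≤ idx
  · simp [fA, fWalk, hg]
  · rcases hpre with h | h | ⟨hna, hnd, hno2⟩
    · exact absurd h (by omega)
    · exact absurd h (by omega)
    · have := pvMain n a d hnd hno2 (d.length + 1) [] idx List.nodup_nil
        (by intro c hc; cases hc) trivial (by simp)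
      simpa [pvMark] using this
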